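-- pv_equiv track=rewrite | github.com/adityaranjan2005/Data-Structures-and-Algorithms | Maximum Substring | InterviewBit/solution.py | solve
-- ===== SOURCE A (Python) =====
-- def solve(A, B):
--     max_a_count = 0
--     n = len(A)
--
--     for i in range(0, n, B):
--         substring = A[i:i + B]
--         a_count = substring.count('a')
--         max_a_count = max(max_a_count, a_count)
--
--     return max_a_count
-- ===== SOURCE B (Python) =====
-- def solve(A, B):
--     n = len(A)
--     prefix = [0] * (n + 1)
--     for i in range(n):
--         prefix[i + 1] = prefix[i] + (1 if A[i] == 'a' else 0)
--     best = 0
--     for i in range(0, n, B):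
--         j = min(i + B, n)
--         best = max(best, prefix[j] - prefix[i])
--     return best
-- ===== Notes on version B (the rewrite author's own statement) =====
-- stated objective: alternative
-- what changed: Replaces per-chunk slicing and .count with a prefix-sum table built in one pass; each chunk's 'a'-count becomes a subtraction of two table entries.
import Mathlib
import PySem

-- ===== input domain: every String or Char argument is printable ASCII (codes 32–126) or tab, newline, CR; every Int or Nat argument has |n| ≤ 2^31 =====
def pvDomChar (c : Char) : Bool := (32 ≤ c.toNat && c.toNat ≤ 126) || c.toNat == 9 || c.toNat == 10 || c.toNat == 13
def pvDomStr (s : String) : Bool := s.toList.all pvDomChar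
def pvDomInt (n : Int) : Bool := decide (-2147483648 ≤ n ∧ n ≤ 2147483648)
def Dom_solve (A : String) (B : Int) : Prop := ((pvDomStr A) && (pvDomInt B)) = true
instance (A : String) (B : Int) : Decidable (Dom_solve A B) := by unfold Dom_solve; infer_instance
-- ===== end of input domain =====

-- B replaces A's per-chunk slice-and-count with a one-pass prefix-sum table and
-- a subtraction per chunk; same O(n) cost, different structure.

-- ===== PORT A =====
-- substring.count('a') on a one-char pattern is exactly the count of the char
-- 'a' among the substring's characters, ported via List.slice/count on toList.
def solve (A : String) (B : Int) : Int :=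
  let n : Int := A.toList.length
  (PySem.List.pyRange 0 n B).foldl (fun max_a_count i =>
    let substring := PySem.List.slice A.toList (some i) (some (i + B))
    let a_count : Int := (PySem.List.count substring 'a' : Nat)
    max max_a_count a_count) 0

-- ===== PORT B =====
def solve_alt (A : String) (B : Int) : Int :=
  let n : Int := A.toList.length
  -- for i in range(n): prefix[i+1] = prefix[i] + (1 if A[i]=='a' else 0)
  let pre : List Int :=
    A.toList.foldl (fun p c => p ++ [p.getLastD 0 + (if c = 'a' then 1 else 0)]) [0]
  (PySem.List.pyRange 0 n B).foldl (fun best i =>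
    let j := min (i + B) n
    max best (PySem.List.pyGetD pre j 0 - PySem.List.pyGetD pre i 0)) 0

-- ===== PRECONDITION & SPEC =====
-- Pre_ excludes only B = 0, on which Python's range(0, n, 0) raises ValueError.
def Pre_solve (A : String) (B : Int) : Prop := B ≠ 0
instance (A : String) (B : Int) : Decidable (Pre_solve A B) := by unfold Pre_solve; infer_instance
def pvWitness_solve : String × Int := ("abacada", 3)

def Spec_solve (A : String) (B : Int) (out : Int) : Prop := out = solve_alt A B
instance (A : String) (B : Int) (out : Int) : Decidable (Spec_solve A B out) := by unfold Spec_solve; infer_instance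

-- ===== CLAIM (what is proved, stated in full; the proofs are below) =====
def Claim_equal_solve : Prop := ∀ (A : String) (B : Int), Dom_solve A B → Pre_solve A B → Spec_solve A B (solve A B)

-- ===== LEMMAS AND PROOFS =====

-- The prefix table is the table of counts of 'a' among the first k characters.
theorem prefix_eq (cs : List Char) :
    cs.foldl (fun p c => p ++ [p.getLastD 0 + (if c = 'a' then 1 else 0)]) [0]
      = (List.range (cs.length + 1)).map (fun k => ((cs.take k).count 'a' : Int)) := by
  induction cs using List.reverseRecOn with
  | nil => simp
  | append_singleton cs c ih =>
    rw [List.foldl_append, ih]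
    simp only [List.foldl_cons, List.foldl_nil, List.length_append, List.length_singleton]
    have h1 : (List.range (cs.length + 1 + 1)).map
        (fun k => (((cs ++ [c]).take k).count 'a' : Int))
        = (List.range (cs.length + 1)).map (fun k => (((cs ++ [c]).take k).count 'a' : Int))
          ++ [(((cs ++ [c]).take (cs.length + 1)).count 'a' : Int)] := by
      rw [List.range_succ, List.map_append]; rfl
    have h2 : (List.range (cs.length + 1)).map
        (fun k => (((cs ++ [c]).take k).count 'a' : Int))
        = (List.range (cs.length + 1)).map (fun k => ((cs.take k).count 'a' : Int)) := by
      apply List.map_congr_left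
      intro k hk
      simp only [List.mem_range] at hk
      rw [List.take_append_of_le_length (by omega)]
    have h3 : ((List.range (cs.length + 1)).map
        (fun k => ((cs.take k).count 'a' : Int))).getLastD 0
        = ((cs.take cs.length).count 'a' : Int) := by
      rw [List.getLastD_eq_getLast?, List.getLast?_eq_getElem?]
      simp [List.length_range]
    have h4 : (((cs ++ [c]).take (cs.length + 1)).count 'a' : Int)
        = ((cs.take cs.length).count 'a' : Int) + (if c = 'a' then 1 else 0) := by
      rw [List.take_length, show cs.length + 1 = (cs ++ [c]).length by simp,
        List.take_length, List.count_append]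
      by_cases h : c = 'a' <;> simp [h]
    rw [h1, h2, h3, h4]

theorem getD_prefix (cs : List Char) (k : Nat) (hk : k ≤ cs.length) :
    ((List.range (cs.length + 1)).map (fun j => ((cs.take j).count 'a' : Int))).getD k 0
      = ((cs.take k).count 'a' : Int) := by
  rw [List.getD_eq_getElem?_getD, List.getElem?_map]
  rw [List.getElem?_range (by omega)]
  rfl

theorem solve_eq_alt (A : String) (B : Int) (hB : B ≠ 0) : solve A B = solve_alt A B := by
  unfold solve solve_alt
  simp only []
  rw [prefix_eq]
  rcases lt_or_gt_of_ne hB with hneg | hpos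
  · -- B < 0 : range(0, len(A), B) is empty since 0 ≤ len(A)
    have hnil : PySem.List.pyRange 0 (A.toList.length : Int) B = [] := by
      apply List.eq_nil_iff_forall_not_mem.mpr
      intro x hx
      rw [PySem.List.mem_pyRange_iff_of_neg hneg] at hx
      omega
    rw [hnil]; rfl
  · apply PySem.List.foldl_congr_mem
    intro acc i hi
    rw [PySem.List.mem_pyRange_iff_of_pos hpos] at hi
    obtain ⟨hi0, hin, -⟩ := hi
    congr 1
    have hiB0 : (0:Int) ≤ i + B := by omega
    have hj0 : (0:Int) ≤ min (i + B) (A.toList.length : Int) := by omega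
    rw [PySem.List.slice_toNat A.toList hi0 hiB0, PySem.List.count_eq]
    rw [PySem.List.pyGetD_of_nonneg _ _ hj0, PySem.List.pyGetD_of_nonneg _ _ hi0]
    rw [getD_prefix A.toList (min (i + B) (A.toList.length : Int)).toNat (by omega),
      getD_prefix A.toList i.toNat (by omega)]
    have htake : A.toList.take ((min (i + B) (A.toList.length : Int)).toNat)
        = A.toList.take (i.toNat + ((i + B).toNat - i.toNat)) := by
      rcases le_or_gt (i + B) (A.toList.length : Int) with h | h
      · congr 1; omega
      · rw [show (min (i + B) (A.toList.length : Int)).toNat = A.toList.length by omega,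
          List.take_length, List.take_of_length_le (by omega)]
    rw [htake, List.take_add, List.count_append]
    push_cast
    ring

-- ===== VERDICT (by name: the statement is the Claim_ definition above) =====
theorem solve_spec : Claim_equal_solve := by
  intro A B _ hpre
  exact solve_eq_alt A B hpre
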